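-- pv_equiv track=rewrite | github.com/ZPZhou-lab/DeepLearning-Tensorflow | source/code/ch8.py | compute_vertex_edge_loc
-- ===== SOURCE A (Python) =====
-- def compute_vertex_edge_loc(vertex, edges):
--     """
--     ### 计算每个节点邻居边的起始位置
--         重新将边 `edges` 按照节点名称排序，然后计算每个节点邻居边的在 edges 中的起始位置 `vertex_edge_loc`\n
--         这样当给定节点 `v` 时，可以通过 `vertex_edge_loc[v]` 得到 `v` 的邻居边在 `edges` 中的起始位置\n
--     """
--
--     # 对边进行排序
--     # 先按照 node1 排序，再按照 node2 排序
--     edges = sorted(edges, key=lambda x: (x[0], x[1]))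
--
--     # 记录每个节点边的起始位置，以便于快速查询
--     # 默认值为 [-1, -1]，表示该节点没有邻居边
--     vertex_edge_loc = {node : [-1,-1] for node in vertex}
--     for i, edge in enumerate(edges):
--         if vertex_edge_loc[edge[0]][0] == -1:
--             vertex_edge_loc[edge[0]][0] = i
--         vertex_edge_loc[edge[0]][1] = i + 1
--
--     return edges, vertex_edge_loc
-- ===== SOURCE B (Python) =====
-- def compute_vertex_edge_loc(vertex, edges):
--     # Counting + prefix-sum re-implementation: tally how many edges leave each
--     # node, then place each node's [start, end) block by accumulating offsets
--     # over the sorted distinct keys -- no positional scan of the edge list.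
--     edges = sorted(edges, key=lambda x: (x[0], x[1]))
--     counts = {}
--     for a in [e[0] for e in edges]:
--         counts[a] = counts.get(a, 0) + 1
--     vertex_edge_loc = {node: [-1, -1] for node in vertex}
--     offset = 0
--     for key in sorted(counts):
--         c = counts[key]
--         loc = vertex_edge_loc[key]  # KeyError if an edge's node is not in vertex, as in A
--         loc[0] = offset
--         loc[1] = offset + c
--         offset += c
--     return edges, vertex_edge_loc
-- ===== Notes on version B (the rewrite author's own statement) =====
-- stated objective: alternative
-- what changed: Replaces A's per-edge conditional start/end updates with a counting pass that tallies how many edges leave each source node and a prefix-sum over the sorted distinct keys, assigning each node's whole [start, end) block arithmetically from the counts.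
import Mathlib
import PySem

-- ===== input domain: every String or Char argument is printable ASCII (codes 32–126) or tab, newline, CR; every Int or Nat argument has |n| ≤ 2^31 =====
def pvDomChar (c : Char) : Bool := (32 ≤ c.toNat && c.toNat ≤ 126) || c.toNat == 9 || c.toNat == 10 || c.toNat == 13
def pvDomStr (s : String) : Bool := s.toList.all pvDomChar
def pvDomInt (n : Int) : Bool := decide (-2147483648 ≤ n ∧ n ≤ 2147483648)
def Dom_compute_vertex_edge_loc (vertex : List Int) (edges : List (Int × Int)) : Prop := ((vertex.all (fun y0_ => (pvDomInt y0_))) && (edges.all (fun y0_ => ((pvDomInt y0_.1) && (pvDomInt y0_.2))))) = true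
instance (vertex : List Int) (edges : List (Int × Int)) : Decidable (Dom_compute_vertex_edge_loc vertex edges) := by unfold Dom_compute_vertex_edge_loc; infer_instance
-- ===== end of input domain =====

-- B replaces A's per-edge conditional updates of the dict entries with a counting pass
-- (edges per source node) followed by a prefix-sum over the sorted distinct keys that
-- places each node's whole [start, end) block arithmetically
-- (objective: alternative decomposition, same asymptotic cost).

-- ===== PORT A =====
-- one iteration of A's `for i, edge in enumerate(edges)` body; the value lists always
-- have length 2, so Python's in-range assignments loc[0]=i / loc[1]=i+1 are List.set (exact here)
def pvStepA (i : Int) (e : Int × Int) (d : PySem.Dict Int (List Int)) : PySem.Dict Int (List Int) :=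
  match d.get? e.1 with
  | none => d  -- Python raises KeyError here (excluded by Pre_)
  | some loc =>
    let loc := if PySem.List.pyGet? loc 0 = some (-1 : Int) then loc.set 0 i else loc
    let loc := loc.set 1 (i + 1)
    d.insert e.1 loc

def pvLoopA (d : PySem.Dict Int (List Int)) (i : Int) : List (Int × Int) → PySem.Dict Int (List Int)
  | [] => d
  | e :: rest => pvLoopA (pvStepA i e d) (i + 1) rest

def compute_vertex_edge_loc (vertex : List Int) (edges : List (Int × Int)) : (List (Int × Int)) × (List (Int × List Int)) :=
  let es := PySem.List.sorted2 edges Prod.fst Prod.snd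
  let d0 := vertex.foldl (fun d node => d.insert node ([-1, -1] : List Int)) PySem.Dict.empty
  let d := pvLoopA d0 0 es
  (es, d.items)

-- ===== PORT B =====
-- `for a in [e[0] for e in edges]: counts[a] = counts.get(a, 0) + 1`
def pvCountsB (es : List (Int × Int)) : PySem.Dict Int Int :=
  (es.map Prod.fst).foldl (fun c a => c.insert a (c.getD a 0 + 1)) PySem.Dict.empty

-- `for key in sorted(counts): c = counts[key]; loc = vertex_edge_loc[key]; loc[0] = offset; loc[1] = offset + c; offset += c`
-- (every key iterated is a key of counts, so Python's counts[key] never raises; getD is exact there;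
-- the value lists always have length 2, so loc[0]=…/loc[1]=… are List.set, exact here)
def pvAssignB (counts : PySem.Dict Int Int) : List Int → Int → PySem.Dict Int (List Int) → PySem.Dict Int (List Int)
  | [], _, d => d
  | k :: ks, off, d =>
    let c := counts.getD k 0
    match d.get? k with
    | none => d  -- Python raises KeyError here (excluded by Pre_)
    | some loc => pvAssignB counts ks (off + c) (d.insert k ((loc.set 0 off).set 1 (off + c)))

def compute_vertex_edge_loc_alt (vertex : List Int) (edges : List (Int × Int)) : (List (Int × Int)) × (List (Int × List Int)) :=
  let es := PySem.List.sorted2 edges Prod.fst Prod.snd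
  let counts := pvCountsB es
  let d0 := vertex.foldl (fun d node => d.insert node ([-1, -1] : List Int)) PySem.Dict.empty
  let d := pvAssignB counts (PySem.List.sorted counts.keys (fun x => x) false) 0 d0
  (es, d.items)

-- ===== PRECONDITION & SPEC =====
-- Pre_ excludes exactly the inputs where some edge's first node is missing from `vertex`:
-- there A raises KeyError, returning nothing.
def Pre_compute_vertex_edge_loc (vertex : List Int) (edges : List (Int × Int)) : Prop :=
  ∀ e ∈ edges, e.1 ∈ vertex
instance (vertex : List Int) (edges : List (Int × Int)) : Decidable (Pre_compute_vertex_edge_loc vertex edges) := by unfold Pre_compute_vertex_edge_loc; infer_instance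

def pvWitness_compute_vertex_edge_loc : List Int × (List (Int × Int)) := ([1, 2, 3], [(2, 1), (1, 3), (2, 2)])

def Spec_compute_vertex_edge_loc (vertex : List Int) (edges : List (Int × Int)) (out : (List (Int × Int)) × (List (Int × List Int))) : Prop := out = compute_vertex_edge_loc_alt vertex edges
instance (vertex : List Int) (edges : List (Int × Int)) (out : (List (Int × Int)) × (List (Int × List Int))) : Decidable (Spec_compute_vertex_edge_loc vertex edges out) := by unfold Spec_compute_vertex_edge_loc; infer_instance

-- ===== CLAIM (what is proved, stated in full; the proofs are below) =====
def Claim_equal_compute_vertex_edge_loc : Prop := ∀ (vertex : List Int) (edges : List (Int × Int)), Dom_compute_vertex_edge_loc vertex edges → Pre_compute_vertex_edge_loc vertex edges → Spec_compute_vertex_edge_loc vertex edges (compute_vertex_edge_loc vertex edges)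


-- ===== LEMMAS AND PROOFS =====

-- sorted2 with keys (fst, snd) yields first components in nondecreasing order
theorem pv_insertBy_pairwise_lex (x : Int × Int) (ys : List (Int × Int))
    (h : ys.Pairwise (fun a b => a.1 ≤ b.1)) :
    (PySem.List.insertBy
      (fun a b => decide (a.1 < b.1) || (!decide (b.1 < a.1) && decide (a.2 < b.2))) x ys).Pairwise
      (fun a b => a.1 ≤ b.1) := by
  induction ys with
  | nil => simp [PySem.List.insertBy]
  | cons y ys ih =>
    rw [List.pairwise_cons] at h
    obtain ⟨hy, hys⟩ := h
    rw [PySem.List.insertBy]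
    split_ifs with hb
    · have hxy : x.1 ≤ y.1 := by
        simp only [Bool.or_eq_true, Bool.and_eq_true, Bool.not_eq_eq_eq_not, Bool.not_true,
          decide_eq_true_eq, decide_eq_false_iff_not] at hb
        rcases hb with h1 | ⟨h1, _⟩ <;> omega
      refine List.pairwise_cons.2 ⟨?_, List.pairwise_cons.2 ⟨hy, hys⟩⟩
      intro z hz
      rcases List.mem_cons.1 hz with rfl | hz
      · exact hxy
      · exact le_trans hxy (hy z hz)
    · have hyx : y.1 ≤ x.1 := by
        simp only [Bool.or_eq_true, Bool.and_eq_true, Bool.not_eq_eq_eq_not, Bool.not_true,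
          decide_eq_true_eq, decide_eq_false_iff_not, not_or, not_and] at hb
        omega
      refine List.pairwise_cons.2 ⟨?_, ih hys⟩
      intro z hz
      rcases (PySem.List.mem_insertBy _ _ _ _).1 hz with rfl | hz
      · exact hyx
      · exact hy z hz

theorem pv_sorted2_fst_pairwise (xs : List (Int × Int)) :
    (PySem.List.sorted2 xs Prod.fst Prod.snd).Pairwise (fun a b => a.1 ≤ b.1) := by
  have aux : ∀ (l : List (Int × Int)) (acc : List (Int × Int)),
      acc.Pairwise (fun a b => a.1 ≤ b.1) →
      (l.foldl (fun acc x => PySem.List.insertBy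
        (fun a b => decide (a.1 < b.1) || (!decide (b.1 < a.1) && decide (a.2 < b.2))) x acc) acc).Pairwise
        (fun a b => a.1 ≤ b.1) := by
    intro l
    induction l with
    | nil => intro acc h; exact h
    | cons x l ih =>
      intro acc h
      exact ih _ (pv_insertBy_pairwise_lex x acc h)
  exact aux xs [] List.Pairwise.nil

-- the initial dict comprehension maps every member of `vertex` to [-1, -1]
theorem pv_init_get? (vertex : List Int) (d : PySem.Dict Int (List Int)) (v : Int) (hv : v ∈ vertex) :
    (vertex.foldl (fun d node => d.insert node ([-1, -1] : List Int)) d).get? v = some [-1, -1] := by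
  have untouched : ∀ (l : List Int) (d : PySem.Dict Int (List Int)), v ∉ l →
      (l.foldl (fun d node => d.insert node ([-1, -1] : List Int)) d).get? v = d.get? v := by
    intro l
    induction l with
    | nil => intro d _; rfl
    | cons u l ih =>
      intro d hv
      rw [List.foldl_cons, ih _ (fun h => hv (List.mem_cons_of_mem u h)),
        PySem.Dict.get?_insert_of_ne _ _ (fun h : v = u => hv (h ▸ List.mem_cons_self))]
  induction vertex generalizing d with
  | nil => exact absurd hv (List.not_mem_nil)
  | cons u l ih =>
    by_cases hvl : v ∈ l
    · exact ih _ hvl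
    · have hvu : v = u := by
        rcases List.mem_cons.1 hv with h | h
        · exact h
        · exact absurd h hvl
      subst hvu
      rw [List.foldl_cons, untouched l _ hvl, PySem.Dict.get?_insert_self]

-- everything left after dropping the k-run has first component > k
theorem pv_dropWhile_fst_gt (l : List (Int × Int)) (k : Int)
    (hp : l.Pairwise (fun a b => a.1 ≤ b.1)) (hb : ∀ x ∈ l, k ≤ x.1) :
    ∀ x ∈ l.dropWhile (fun y => y.1 == k), k < x.1 := by
  induction l with
  | nil => intro x hx; simp at hx
  | cons y l ih =>
    rw [List.pairwise_cons] at hp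
    obtain ⟨hy, hl⟩ := hp
    rw [List.dropWhile_cons]
    by_cases hyk : y.1 = k
    · simp only [hyk, BEq.rfl, if_true]
      exact ih hl (fun x hx => hb x (List.mem_cons_of_mem y hx))
    · have : (y.1 == k) = false := by simp [hyk]
      simp only [this, Bool.false_eq_true, if_false]
      intro x hx
      have hky : k < y.1 := lt_of_le_of_ne (hb y List.mem_cons_self) (fun h => hyk h.symm)
      rcases List.mem_cons.1 hx with rfl | hx
      · exact hky
      · exact lt_of_lt_of_le hky (hy x hx)

-- A's loop over a run of edges that all start at k just pushes the end marker forward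
theorem pv_loopA_run (run : List (Int × Int)) (rest : List (Int × Int)) (k s j : Int)
    (d : PySem.Dict Int (List Int)) (hs : 0 ≤ s) (hrun : ∀ x ∈ run, x.1 = k) :
    pvLoopA (d.insert k [s, j]) j (run ++ rest)
      = pvLoopA (d.insert k [s, j + run.length]) (j + run.length) rest := by
  induction run generalizing j with
  | nil => simp
  | cons x run ih =>
    have hx1 : x.1 = k := hrun x List.mem_cons_self
    rw [List.cons_append, pvLoopA]
    have hstep : pvStepA j x (d.insert k [s, j]) = d.insert k [s, j + 1] := by
      rw [pvStepA, hx1, PySem.Dict.get?_insert_self]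
      have hcond : PySem.List.pyGet? ([s, j] : List Int) 0 ≠ some (-1 : Int) := by
        rw [PySem.List.pyGet?_zero_cons]
        intro h
        have : s = -1 := by injection h
        omega
      simp only [hcond, if_false, List.set, PySem.Dict.insert_insert_self]
    rw [hstep, ih (j + 1) (fun y hy => hrun y (List.mem_cons_of_mem x hy))]
    have harith : j + 1 + ((run.length : Int)) = j + ((x :: run).length : Int) := by
      simp only [List.length_cons]
      push_cast
      ring
    rw [harith]

-- B's counts dict reads back as the count of the key among the sorted first components
theorem pv_counts_getD (es : List (Int × Int)) (v : Int) :
    (pvCountsB es).getD v 0 = ((es.map Prod.fst).count v : Int) := by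
  rw [pvCountsB, PySem.Dict.getD_foldl_insert_add_one, PySem.Dict.getD_empty]
  ring

-- B's counts dict has exactly the distinct first components (first occurrences in order) as keys
theorem pv_counts_keys (es : List (Int × Int)) :
    (pvCountsB es).keys = PySem.Set.ofList (es.map Prod.fst) := by
  rw [pvCountsB, PySem.Dict.keys_foldl_insert, PySem.Dict.keys_empty, PySem.Set.update_nil_left]

-- B's assignment loop only reads the counts dict at the keys it iterates
theorem pv_assign_congr (c1 c2 : PySem.Dict Int Int) (ks : List Int) (off : Int)
    (d : PySem.Dict Int (List Int)) (h : ∀ k ∈ ks, c1.getD k 0 = c2.getD k 0) :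
    pvAssignB c1 ks off d = pvAssignB c2 ks off d := by
  induction ks generalizing off d with
  | nil => rfl
  | cons k ks ih =>
    rw [pvAssignB, pvAssignB]
    simp only [h k List.mem_cons_self]
    cases d.get? k with
    | none => rfl
    | some loc => exact ih _ _ (fun y hy => h y (List.mem_cons_of_mem k hy))

-- folding Set.add over elements different from the head commutes past the head
theorem pv_foldl_add_cons (l : List Int) (s : List Int) (a : Int) (ha : a ∉ l) :
    l.foldl PySem.Set.add (a :: s) = a :: l.foldl PySem.Set.add s := by
  induction l generalizing s with
  | nil => rfl
  | cons b l ih =>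
    have hba : b ≠ a := fun h => ha (h ▸ List.mem_cons_self)
    have hstep : PySem.Set.add (a :: s) b = a :: PySem.Set.add s b := by
      rw [PySem.Set.add_eq_ite, PySem.Set.add_eq_ite]
      by_cases hb : b ∈ s
      · simp [hb, List.mem_cons, hba]
      · have hb' : b ∉ a :: s := by simp [List.mem_cons, hba, hb]
        simp [hb, hb']
    rw [List.foldl_cons, List.foldl_cons, hstep, ih _ (fun h => ha (List.mem_cons_of_mem b h))]

-- first-occurrence dedup of a run-structured list: the head once, then the rest's dedup
theorem pv_ofList_run (k : Int) (xs ys : List Int)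
    (hxs : ∀ x ∈ xs, x = k) (hys : ∀ y ∈ ys, y ≠ k) :
    PySem.Set.ofList (k :: xs ++ ys) = k :: PySem.Set.ofList ys := by
  rw [PySem.Set.ofList_eq_foldl, PySem.Set.ofList_eq_foldl]
  have hxsfold : ∀ (xs : List Int), (∀ x ∈ xs, x = k) → xs.foldl PySem.Set.add [k] = [k] := by
    intro xs hxs
    induction xs with
    | nil => rfl
    | cons x xs ih =>
      have hx : x = k := hxs x List.mem_cons_self
      rw [List.foldl_cons, hx, PySem.Set.add_of_mem List.mem_cons_self]
      exact ih (fun y hy => hxs y (List.mem_cons_of_mem x hy))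
  have h1 : PySem.Set.add ([] : List Int) k = [k] := rfl
  rw [List.cons_append, List.foldl_cons, h1, List.foldl_append, hxsfold xs hxs]
  exact pv_foldl_add_cons ys [] k (fun h => hys k h rfl)

-- the dedup of a list is a sublist of it
theorem pv_ofList_sublist (l : List Int) : (PySem.Set.ofList l).Sublist l := by
  induction l with
  | nil => exact List.Sublist.refl _
  | cons a l ih =>
    rw [PySem.Set.ofList_cons]
    exact List.Sublist.cons₂ a ((List.filter_sublist).trans ih)

-- a nondecreasing list dedups to a strictly increasing one
theorem pv_ofList_pairwise_lt (l : List Int) (h : l.Pairwise (· ≤ ·)) :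
    (PySem.Set.ofList l).Pairwise (· < ·) := by
  have hle : (PySem.Set.ofList l).Pairwise (· ≤ ·) := h.sublist (pv_ofList_sublist l)
  have hne : (PySem.Set.ofList l).Pairwise (· ≠ ·) := PySem.Set.nodup_ofList l
  exact (hle.and hne).imp (fun ⟨h1, h2⟩ => lt_of_le_of_ne h1 h2)

-- main invariant: on a fst-sorted suffix whose keys are all still at [-1, -1],
-- A's positional loop equals B's count-then-prefix-sum assignment
theorem pv_main (n : Nat) (es : List (Int × Int)) (hn : es.length ≤ n)
    (d : PySem.Dict Int (List Int)) (i : Int) (hi : 0 ≤ i)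
    (hsort : es.Pairwise (fun a b => a.1 ≤ b.1))
    (hinv : ∀ k ∈ es.map Prod.fst, d.get? k = some [-1, -1]) :
    pvLoopA d i es
      = pvAssignB (pvCountsB es) (PySem.List.sorted (pvCountsB es).keys (fun x => x) false) i d := by
  induction n generalizing es d i with
  | zero =>
    have : es = [] := List.eq_nil_of_length_eq_zero (Nat.le_zero.1 hn)
    subst this
    rfl
  | succ n ih =>
    match es with
    | [] => rfl
    | e :: tail =>
      have hpc := List.pairwise_cons.1 hsort
      have htail : tail.Pairwise (fun a b => a.1 ≤ b.1) := hpc.2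
      -- run/rest split of the tail at the head's key
      have hrun : ∀ x ∈ tail.takeWhile (fun x => x.1 == e.1), x.1 = e.1 := by
        intro x hx
        exact eq_of_beq (List.mem_takeWhile_imp (p := fun x : Int × Int => x.1 == e.1) hx)
      have hgt : ∀ x ∈ tail.dropWhile (fun y => y.1 == e.1), e.1 < x.1 :=
        pv_dropWhile_fst_gt tail e.1 htail hpc.1
      have hsplit : tail.takeWhile (fun x => x.1 == e.1) ++ tail.dropWhile (fun x => x.1 == e.1) = tail :=
        List.takeWhile_append_dropWhile
      set run := tail.takeWhile (fun x => x.1 == e.1) with hrun_def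
      set rest := tail.dropWhile (fun y => y.1 == e.1) with hrest_def
      set cnt : Int := 1 + (run.length : Int) with hcnt
      have hrestle : rest.Pairwise (fun a b => a.1 ≤ b.1) := htail.sublist (List.dropWhile_sublist _)
      have hrestmap : (rest.map Prod.fst).Pairwise (· ≤ ·) := List.pairwise_map.2 hrestle
      -- the map of es splits as head :: run-part ++ rest-part
      have hmap : (e :: tail).map Prod.fst = e.1 :: (run.map Prod.fst ++ rest.map Prod.fst) := by
        rw [← hsplit]
        simp
      -- B's count of the head key is the run length plus one
      have hcount : (pvCountsB (e :: tail)).getD e.1 0 = cnt := by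
        rw [pv_counts_getD, hmap]
        have h1 : (run.map Prod.fst).count e.1 = run.length := by
          rw [List.count_eq_length.2]
          · simp
          · intro b hb
            obtain ⟨x, hx, rfl⟩ := List.mem_map.1 hb
            exact (hrun x hx).symm
        have h2 : (rest.map Prod.fst).count e.1 = 0 := by
          rw [List.count_eq_zero.2]
          intro hmem
          obtain ⟨x, hx, hxe⟩ := List.mem_map.1 hmem
          exact absurd hxe (ne_of_gt (hgt x hx))
        rw [List.count_cons_self, List.count_append, h1, h2, hcnt]
        push_cast
        ring
      -- the distinct keys: head once, then the rest's distinct keys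
      have hofl : PySem.Set.ofList ((e :: tail).map Prod.fst) = e.1 :: PySem.Set.ofList (rest.map Prod.fst) := by
        rw [hmap, ← List.cons_append]
        apply pv_ofList_run
        · intro x hx
          obtain ⟨y, hy, rfl⟩ := List.mem_map.1 hx
          exact hrun y hy
        · intro y hy
          obtain ⟨x, hx, rfl⟩ := List.mem_map.1 hy
          exact ne_of_gt (hgt x hx)
      have hltrest : (PySem.Set.ofList (rest.map Prod.fst)).Pairwise (· < ·) :=
        pv_ofList_pairwise_lt _ hrestmap
      have hheadlt : ∀ y ∈ PySem.Set.ofList (rest.map Prod.fst), e.1 < y := by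
        intro y hy
        obtain ⟨x, hx, rfl⟩ := List.mem_map.1 ((PySem.Set.mem_ofList _ _).1 hy)
        exact hgt x hx
      -- sorted(counts) on each side
      have hsortedES : PySem.List.sorted (pvCountsB (e :: tail)).keys (fun x => x) false
          = e.1 :: PySem.Set.ofList (rest.map Prod.fst) := by
        rw [pv_counts_keys]
        apply PySem.List.sorted_eq_of_perm_of_pairwise_lt
        · rw [hofl]
        · exact List.pairwise_cons.2 ⟨hheadlt, hltrest⟩
      have hsortedRest : PySem.List.sorted (pvCountsB rest).keys (fun x => x) false
          = PySem.Set.ofList (rest.map Prod.fst) := by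
        rw [pv_counts_keys]
        exact PySem.List.sorted_eq_of_perm_of_pairwise_lt _ _ _ (List.Perm.refl _) hltrest
      -- A side: the whole run collapses into one dict write
      have hd0 : d.get? e.1 = some [-1, -1] :=
        hinv e.1 (List.mem_map.2 ⟨e, List.mem_cons_self, rfl⟩)
      have hstep : pvStepA i e d = d.insert e.1 [i, i + 1] := by
        rw [pvStepA, hd0]
        simp only [PySem.List.pyGet?_zero_cons, if_pos, List.set]
      have hA : pvLoopA d i (e :: tail)
          = pvLoopA (d.insert e.1 [i, i + cnt]) (i + cnt) rest := by
        conv_lhs => rw [pvLoopA, hstep, ← hsplit]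
        rw [pv_loopA_run _ _ e.1 i (i + 1) d hi hrun]
        have h1 : i + 1 + ((run.length : Int)) = i + cnt := by rw [hcnt]; ring
        rw [h1]
      -- B side: the head key is assigned its block, then the rest
      have hB : pvAssignB (pvCountsB (e :: tail))
            (PySem.List.sorted (pvCountsB (e :: tail)).keys (fun x => x) false) i d
          = pvAssignB (pvCountsB rest)
            (PySem.List.sorted (pvCountsB rest).keys (fun x => x) false) (i + cnt)
            (d.insert e.1 [i, i + cnt]) := by
        rw [hsortedES, pvAssignB]
        simp only [hcount, hd0, List.set]
        rw [hsortedRest]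
        apply pv_assign_congr
        intro k hk
        obtain ⟨x, hx, rfl⟩ := List.mem_map.1 ((PySem.Set.mem_ofList _ _).1 hk)
        rw [pv_counts_getD, pv_counts_getD, hmap]
        have hk1 : (e.1 :: (run.map Prod.fst ++ rest.map Prod.fst)).count x.1
            = (rest.map Prod.fst).count x.1 := by
          have hne : x.1 ≠ e.1 := ne_of_gt (hgt x hx)
          rw [List.count_cons_of_ne hne.symm, List.count_append]
          have : (run.map Prod.fst).count x.1 = 0 := by
            rw [List.count_eq_zero.2]
            intro hmem
            obtain ⟨y, hy, hyx⟩ := List.mem_map.1 hmem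
            exact hne (hyx ▸ (hyx ▸ hrun y hy))
          omega
        rw [hk1]
      rw [hA, hB]
      refine ih rest ?_ _ (i + cnt) ?_ hrestle ?_
      · have h1 : rest.length ≤ tail.length := (List.dropWhile_sublist _).length_le
        have h2 : tail.length ≤ n := Nat.lt_succ_iff.1 (by simpa using hn)
        omega
      · have : (0 : Int) ≤ (run.length : Int) := Int.natCast_nonneg _
        rw [hcnt]; omega
      · intro k hk
        obtain ⟨x, hx, rfl⟩ := List.mem_map.1 hk
        have hne : x.1 ≠ e.1 := ne_of_gt (hgt x hx)
        rw [PySem.Dict.get?_insert_of_ne _ _ hne]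
        exact hinv x.1 (List.mem_map.2 ⟨x, List.mem_cons_of_mem e ((List.dropWhile_sublist _).mem hx), rfl⟩)

-- ===== VERDICT (by name: the statement is the Claim_ definition above) =====
theorem compute_vertex_edge_loc_spec : Claim_equal_compute_vertex_edge_loc := by
  intro vertex edges _ hpre
  unfold Spec_compute_vertex_edge_loc compute_vertex_edge_loc compute_vertex_edge_loc_alt
  simp only
  congr 1
  congr 1
  refine pv_main _ _ le_rfl _ 0 le_rfl (pv_sorted2_fst_pairwise edges) ?_
  intro k hk
  simp only [List.mem_map] at hk
  obtain ⟨e, he, rfl⟩ := hk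
  have he' : e ∈ edges := ((PySem.List.sorted2_perm edges Prod.fst Prod.snd false).mem_iff).1 he
  exact pv_init_get? vertex _ e.1 (hpre e he')
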